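-- pv_equiv track=rewrite | github.com/harveyrendell/strava-reporter | events/achievements.py | get_achievement_icons
-- ===== SOURCE A (Python) =====
-- from collections import Counter
--
-- def get_achievement_icons(num_list):
--     if len(num_list) == 0:
--         return ""
--
--     medals = {
--         0: ":crown:",
--         1: ":first_place:",
--         2: ":second_place:",
--         3: ":third_place:"
--     }
--     icons = ""
--     icon_counts = sorted(Counter(num_list).items())
--
--     for place, count in icon_counts:
--         if count >= 10:
--             icons += f"{medals[place]}x{count}"
--         else:
--             icons += medals[place] * count
--
--     return icons
-- ===== SOURCE B (Python) =====
-- def get_achievement_icons(num_list):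
--     medals = {
--         0: ":crown:",
--         1: ":first_place:",
--         2: ":second_place:",
--         3: ":third_place:"
--     }
--     xs = sorted(num_list)
--     icons = ""
--     i = 0
--     while i < len(xs):
--         run = 1
--         while i + run < len(xs) and xs[i + run] == xs[i]:
--             run += 1
--         icon = medals[xs[i]]
--         icons += icon + "x" + str(run) if run >= 10 else icon * run
--         i += run
--     return icons
-- ===== Notes on version B (the rewrite author's own statement) =====
-- stated objective: alternative
-- what changed: Replaced the Counter-then-sort-items pipeline by sorting the list itself and walking it once with a run-length scan, formatting each consecutive run directly.
import Mathlib
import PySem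

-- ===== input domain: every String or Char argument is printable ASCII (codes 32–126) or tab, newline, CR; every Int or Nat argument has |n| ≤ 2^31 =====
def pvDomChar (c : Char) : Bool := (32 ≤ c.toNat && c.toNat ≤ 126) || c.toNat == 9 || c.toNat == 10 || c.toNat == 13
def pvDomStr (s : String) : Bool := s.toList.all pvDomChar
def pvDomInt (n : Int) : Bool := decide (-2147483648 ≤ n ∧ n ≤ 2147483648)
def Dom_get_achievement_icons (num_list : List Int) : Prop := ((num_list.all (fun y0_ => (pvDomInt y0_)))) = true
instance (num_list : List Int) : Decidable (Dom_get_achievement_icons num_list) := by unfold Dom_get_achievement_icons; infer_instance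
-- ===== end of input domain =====

-- B replaces Counter+sorted-items by sorting the list and one run-length scan; same cost, different structure.


-- ===== PORT A =====
-- the literal 'medals' dict of A
def pvMedalsA : PySem.Dict Int String :=
  PySem.Dict.ofList [(0, ":crown:"), (1, ":first_place:"), (2, ":second_place:"), (3, ":third_place:")]

-- medals[place] raises KeyError outside Pre_; under Pre_ the key is present, so getD's default is never used.
-- sorted(items) compares tuples, but Counter keys are distinct, so key = fst gives the identical order.
def get_achievement_icons (num_list : List Int) : String :=
  if num_list.length = 0 then "" else
    let icon_counts := PySem.List.sorted (PySem.Dict.counter num_list).items (fun p => p.1) false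
    icon_counts.foldl (fun icons pc =>
      if pc.2 ≥ 10 then
        icons ++ PySem.Dict.getD pvMedalsA pc.1 "" ++ "x" ++ PySem.Int.toStr pc.2
      else
        icons ++ String.ofList (PySem.List.pyRepeat (PySem.Dict.getD pvMedalsA pc.1 "").toList pc.2)) ""

-- ===== PORT B =====
def pvMedalsB : PySem.Dict Int String :=
  PySem.Dict.ofList [(0, ":crown:"), (1, ":first_place:"), (2, ":second_place:"), (3, ":third_place:")]

-- the inner while-scan of Source B: each step takes one run (its value and length) off the sorted list
def pvGroups : List Int → List (Int × Int)
  | [] => []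
  | x :: rest =>
    (x, 1 + ((rest.takeWhile (fun y => y == x)).length : Int)) ::
      pvGroups (rest.dropWhile (fun y => y == x))
  termination_by l => l.length
  decreasing_by
    exact Nat.lt_succ_of_le (List.length_dropWhile_le (fun y => y == x) rest)

-- medals[xs[i]] raises KeyError outside Pre_; under Pre_ the default is never used.
def get_achievement_icons_alt (num_list : List Int) : String :=
  let xs := PySem.List.sorted num_list (fun x => x) false
  (pvGroups xs).foldl (fun icons pc =>
    if pc.2 ≥ 10 then
      icons ++ PySem.Dict.getD pvMedalsB pc.1 "" ++ "x" ++ PySem.Int.toStr pc.2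
    else
      icons ++ String.ofList (PySem.List.pyRepeat (PySem.Dict.getD pvMedalsB pc.1 "").toList pc.2)) ""

-- ===== PRECONDITION & SPEC =====
-- Pre_ excludes exactly the lists containing a value outside 0..3, on which Python A raises KeyError
-- (medals[place]); B raises the same KeyError there.
def Pre_get_achievement_icons (num_list : List Int) : Prop := ∀ x ∈ num_list, 0 ≤ x ∧ x ≤ 3
instance (num_list : List Int) : Decidable (Pre_get_achievement_icons num_list) := by
  unfold Pre_get_achievement_icons; infer_instance
def pvWitness_get_achievement_icons : List Int := [0, 1, 1, 3, 0]

def Spec_get_achievement_icons (num_list : List Int) (out : String) : Prop := out = get_achievement_icons_alt num_list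
instance (num_list : List Int) (out : String) : Decidable (Spec_get_achievement_icons num_list out) := by unfold Spec_get_achievement_icons; infer_instance

-- ===== CLAIM (what is proved, stated in full; the proofs are below) =====
def Claim_equal_get_achievement_icons : Prop := ∀ (num_list : List Int), Dom_get_achievement_icons num_list → Pre_get_achievement_icons num_list → Spec_get_achievement_icons num_list (get_achievement_icons num_list)

-- ===== LEMMAS AND PROOFS =====

-- after the run of x's, every element of a ≤-sorted tail is strictly greater than x
theorem pv_drop_gt (x : Int) (rest : List Int) (hs : (x :: rest).Pairwise (· ≤ ·)) :
    ∀ y ∈ rest.dropWhile (fun y => y == x), x < y := by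
  induction rest with
  | nil => intro y hy; simp at hy
  | cons r rs ih =>
    rcases List.pairwise_cons.mp hs with ⟨hxall, htail⟩
    intro y hy
    rw [List.dropWhile_cons] at hy
    by_cases hr : (r == x) = true
    · rw [if_pos hr] at hy
      have hs' : (x :: rs).Pairwise (fun a b => a ≤ b) :=
        List.Pairwise.cons (fun b hb => hxall b (List.mem_cons_of_mem r hb))
          (List.pairwise_cons.mp htail).2
      exact ih hs' y hy
    · rw [if_neg hr] at hy
      have hxr : x < r := lt_of_le_of_ne (hxall r (by simp))
        (fun he => hr (by simp [he.symm]))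
      rcases List.mem_cons.mp hy with rfl | hyrs
      · exact hxr
      · exact lt_of_lt_of_le hxr ((List.pairwise_cons.mp htail).1 y hyrs)

-- every element of the run equals x
theorem pv_take_eq (x : Int) (rest : List Int) :
    ∀ y ∈ rest.takeWhile (fun y => y == x), y = x := by
  intro y hy
  simpa using List.mem_takeWhile_imp hy

theorem pvGroups_fst_mem (l : List Int) (p : Int × Int) (hp : p ∈ pvGroups l) : p.1 ∈ l := by
  induction l using pvGroups.induct with
  | case1 => simp [pvGroups] at hp
  | case2 x rest ih =>
    rw [pvGroups] at hp
    rcases List.mem_cons.mp hp with rfl | hp'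
    · exact List.mem_cons_self
    · exact List.mem_cons_of_mem x ((List.dropWhile_sublist _).subset (ih hp'))

theorem pvGroups_pairwise (l : List Int) (hs : l.Pairwise (· ≤ ·)) :
    (pvGroups l).Pairwise (fun a b => a.1 < b.1) := by
  induction l using pvGroups.induct with
  | case1 => simp [pvGroups]
  | case2 x rest ih =>
    rw [pvGroups]
    refine List.pairwise_cons.mpr ⟨?_, ?_⟩
    · intro q hq
      exact pv_drop_gt x rest hs _ (pvGroups_fst_mem _ q hq)
    · exact ih (hs.sublist ((List.dropWhile_sublist _).cons x))

-- total count of x in x :: rest equals 1 + the length of x's initial run, for ≤-sorted input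
theorem pv_count_head (x : Int) (rest : List Int) (hs : (x :: rest).Pairwise (· ≤ ·)) :
    (x :: rest).count x = 1 + (rest.takeWhile (fun y => y == x)).length := by
  have htd : rest.takeWhile (fun y => y == x) ++ rest.dropWhile (fun y => y == x) = rest :=
    List.takeWhile_append_dropWhile
  have hcount_take : (rest.takeWhile (fun y => y == x)).count x
      = (rest.takeWhile (fun y => y == x)).length :=
    List.count_eq_length.2 (fun b hb => (pv_take_eq x rest b hb).symm)
  have hxdrop : x ∉ rest.dropWhile (fun y => y == x) := fun hmem =>
    lt_irrefl x (pv_drop_gt x rest hs x hmem)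
  have h := congrArg (List.count x) htd
  rw [List.count_append, hcount_take, List.count_eq_zero.2 hxdrop] at h
  rw [List.count_cons_self]
  omega

-- count of a non-head value lives entirely in the dropWhile part
theorem pv_count_tail (x z : Int) (rest : List Int) (hxz : x ≠ z)
    (hnot_take : x ∉ rest.takeWhile (fun y => y == z)) :
    (z :: rest).count x = (rest.dropWhile (fun y => y == z)).count x := by
  have htd : rest.takeWhile (fun y => y == z) ++ rest.dropWhile (fun y => y == z) = rest :=
    List.takeWhile_append_dropWhile
  have h := congrArg (List.count x) htd
  rw [List.count_append, List.count_eq_zero.2 hnot_take] at h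
  rw [List.count_cons, if_neg (by simpa using Ne.symm hxz)]
  omega

theorem pvGroups_snd_count (l : List Int) (hs : l.Pairwise (· ≤ ·)) (p : Int × Int)
    (hp : p ∈ pvGroups l) : p.2 = (l.count p.1 : Int) := by
  induction l using pvGroups.induct with
  | case1 => simp [pvGroups] at hp
  | case2 x rest ih =>
    rw [pvGroups] at hp
    rcases List.mem_cons.mp hp with rfl | hp'
    · rw [pv_count_head x rest hs]
      push_cast
      ring
    · have hdrop_s : (rest.dropWhile (fun y => y == x)).Pairwise (fun a b => a ≤ b) :=
        hs.sublist ((List.dropWhile_sublist _).cons x)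
      have h1 : p.1 ∈ rest.dropWhile (fun y => y == x) := pvGroups_fst_mem _ p hp'
      have hx1 : x < p.1 := pv_drop_gt x rest hs _ h1
      have hnot_take : p.1 ∉ rest.takeWhile (fun y => y == x) := fun hmem =>
        absurd (pv_take_eq x rest _ hmem) (by omega)
      rw [ih hdrop_s hp', pv_count_tail p.1 x rest (by omega) hnot_take]

theorem pvGroups_mem_of_mem (l : List Int) (hs : l.Pairwise (· ≤ ·)) (x : Int) (hx : x ∈ l) :
    (x, (l.count x : Int)) ∈ pvGroups l := by
  induction l using pvGroups.induct with
  | case1 => simp at hx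
  | case2 z rest ih =>
    have htd : rest.takeWhile (fun y => y == z) ++ rest.dropWhile (fun y => y == z) = rest :=
      List.takeWhile_append_dropWhile
    rw [pvGroups]
    by_cases hxz : x = z
    · subst hxz
      have hc : ((x :: rest).count x : Int)
          = 1 + ((rest.takeWhile (fun y => y == x)).length : Int) := by
        rw [pv_count_head x rest hs]; push_cast; ring
      exact List.mem_cons.mpr (Or.inl (Prod.ext rfl hc))
    · have hxrest : x ∈ rest := by
        rcases List.mem_cons.mp hx with rfl | h
        · exact absurd rfl hxz
        · exact h
      have hxdrop : x ∈ rest.dropWhile (fun y => y == z) := by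
        rcases (List.mem_append.mp (htd ▸ hxrest)) with h | h
        · exact absurd (pv_take_eq z rest x h) hxz
        · exact h
      have hdrop_s : (rest.dropWhile (fun y => y == z)).Pairwise (fun a b => a ≤ b) :=
        hs.sublist ((List.dropWhile_sublist _).cons z)
      have hnot_take : x ∉ rest.takeWhile (fun y => y == z) := fun hmem =>
        absurd (pv_take_eq z rest _ hmem) hxz
      have hc : (z :: rest).count x = (rest.dropWhile (fun y => y == z)).count x :=
        pv_count_tail x z rest hxz hnot_take
      refine List.mem_cons.mpr (Or.inr ?_)
      rw [hc]
      exact ih hdrop_s hxdrop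

theorem pvGroups_eq_sorted_items (num_list : List Int) :
    PySem.List.sorted (PySem.Dict.counter num_list).items (fun p => p.1) false
      = pvGroups (PySem.List.sorted num_list (fun x => x) false) := by
  have hsort : (PySem.List.sorted num_list (fun x => x) false).Pairwise (· ≤ ·) := by
    simpa using PySem.List.sorted_pairwise num_list (fun x => x)
  have hperm_l : (PySem.List.sorted num_list (fun x => x) false).Perm num_list :=
    PySem.List.sorted_perm num_list _ _
  have hpair : (pvGroups (PySem.List.sorted num_list (fun x => x) false)).Pairwise
      (fun a b => a.1 < b.1) := pvGroups_pairwise _ hsort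
  have hnd1 : (pvGroups (PySem.List.sorted num_list (fun x => x) false)).Nodup :=
    hpair.imp fun h heq => absurd (congrArg Prod.fst heq)
      (by intro h'; exact lt_irrefl _ (h' ▸ h))
  have hnd2 : ((PySem.Set.ofList num_list).map
      (fun k => (k, (num_list.count k : Int)))).Nodup :=
    (PySem.Set.nodup_ofList num_list).map (fun a b h => congrArg Prod.fst h)
  have hperm : (pvGroups (PySem.List.sorted num_list (fun x => x) false)).Perm
      ((PySem.Dict.counter num_list).items) := by
    rw [PySem.Dict.items_counter]
    refine (List.perm_ext_iff_of_nodup hnd1 hnd2).2 ?_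
    intro a
    constructor
    · intro ha
      refine List.mem_map.mpr ⟨a.1, ?_, ?_⟩
      · exact (PySem.Set.mem_ofList num_list a.1).2
          (hperm_l.mem_iff.mp (pvGroups_fst_mem _ a ha))
      · have h2 := pvGroups_snd_count _ hsort a ha
        rw [hperm_l.count_eq] at h2
        exact Prod.ext rfl h2.symm
    · intro ha
      rcases List.mem_map.mp ha with ⟨k, hk, rfl⟩
      have hk' : k ∈ PySem.List.sorted num_list (fun x => x) false :=
        hperm_l.mem_iff.mpr ((PySem.Set.mem_ofList num_list k).1 hk)
      have := pvGroups_mem_of_mem _ hsort k hk'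
      rwa [hperm_l.count_eq] at this
  exact PySem.List.sorted_eq_of_perm_of_pairwise_lt _ _ (fun p => p.1) hperm hpair

-- ===== VERDICT (by name: the statement is the Claim_ definition above) =====
theorem get_achievement_icons_spec : Claim_equal_get_achievement_icons := by
  intro num_list _ _
  unfold Spec_get_achievement_icons get_achievement_icons get_achievement_icons_alt
  by_cases h : num_list.length = 0
  · have h0 : num_list = [] := List.length_eq_zero_iff.mp h
    subst h0
    rw [if_pos h,
      show PySem.List.sorted ([] : List Int) (fun x => x) false = ([] : List Int) from rfl]
    simp [pvGroups]
  · rw [if_neg h, pvGroups_eq_sorted_items]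
    simp only [pvMedalsA, pvMedalsB]
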